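-- pv_equiv track=rewrite | github.com/ccic-data/FAIMS_parser | scripts/FAIMS_parser.py | string_parser2
-- ===== SOURCE A (Python) =====
-- def string_parser2(string, index_num):
--     temp_str = ''
--     equal_count = 0
--
--     for i in range(len(string)):
--
--         temp_str = temp_str + string[i]
--
--         if string[i] == '=':
--             equal_count = equal_count+1
--
--         if equal_count == 4:
--             temp_str = temp_str + str(index_num)
--
--             break
--
--     quote_count = 0
--     for i in range(len(string)):
--
--         if string[i] == '"':
--             quote_count = quote_count+1
--
--         if quote_count == 2:
--             temp_str = temp_str + string[i]
--
--
--     return temp_str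
-- ===== SOURCE B (Python) =====
-- def string_parser2(string, index_num):
--     eqs = [i for i, c in enumerate(string) if c == '=']
--     head = string[:eqs[3] + 1] + str(index_num) if len(eqs) >= 4 else string
--     qs = [i for i, c in enumerate(string) if c == '"']
--     if len(qs) < 2:
--         return head
--     end = qs[2] if len(qs) >= 3 else len(string)
--     return head + string[qs[1]:end]
-- ===== Notes on version B (the rewrite author's own statement) =====
-- stated objective: simpler
-- what changed: A streams over the string twice with running '='/'"' counters, an accumulator and a break; B instead builds the delimiter position lists with enumerate comprehensions and produces the result by slicing: string[:eqs[3]+1]+str(index_num) and string[qs[1]:qs[2] or len].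
import Mathlib
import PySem

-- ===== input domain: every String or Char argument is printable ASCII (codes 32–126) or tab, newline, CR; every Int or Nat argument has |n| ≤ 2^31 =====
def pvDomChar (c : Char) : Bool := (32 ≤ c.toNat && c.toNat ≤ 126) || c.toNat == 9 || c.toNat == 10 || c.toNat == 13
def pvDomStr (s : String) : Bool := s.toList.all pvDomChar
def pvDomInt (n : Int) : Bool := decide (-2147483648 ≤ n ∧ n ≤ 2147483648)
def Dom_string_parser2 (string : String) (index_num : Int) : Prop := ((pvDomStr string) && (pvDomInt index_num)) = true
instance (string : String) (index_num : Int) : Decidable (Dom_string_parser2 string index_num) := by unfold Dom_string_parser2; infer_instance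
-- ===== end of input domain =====

-- B replaces A's two counter-driven accumulation loops by comprehension-built delimiter-position lists plus slicing (objective: simpler; not measured faster).

-- ===== PORT A =====
-- first loop: copy chars, count '=', after the 4th append str(index_num) and break
def pvLoopEq (n : Int) : List Char → List Char → Nat → List Char
  | [], acc, _ => acc
  | c :: t, acc, eq =>
    let acc' := acc ++ [c]
    let eq' := if c = '=' then eq + 1 else eq
    if eq' = 4 then acc' ++ PySem.Int.toChars n else pvLoopEq n t acc' eq'

-- second loop: count '"', append chars while the count is exactly 2
def pvLoopQ : List Char → List Char → Nat → List Char
  | [], acc, _ => acc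
  | c :: t, acc, qc =>
    let qc' := if c = '"' then qc + 1 else qc
    let acc' := if qc' = 2 then acc ++ [c] else acc
    pvLoopQ t acc' qc'

def string_parser2 (string : String) (index_num : Int) : String :=
  String.ofList (pvLoopQ string.toList (pvLoopEq index_num string.toList [] 0) 0)

-- ===== PORT B =====
-- [i for i, c in enumerate(string) if c == ch]
def pvPos (l : List Char) (ch : Char) : List Int :=
  ((PySem.List.enumerate l).filter (fun p => p.2 == ch)).map Prod.fst

def string_parser2_alt (string : String) (index_num : Int) : String :=
  let l := string.toList
  let eqs := pvPos l '='
  let head :=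
    if h : 4 ≤ eqs.length then
      PySem.List.slice l none (some (eqs[3] + 1)) ++ PySem.Int.toChars index_num
    else l
  let qs := pvPos l '"'
  if h2 : 2 ≤ qs.length then
    let e := if h3 : 3 ≤ qs.length then qs[2] else (l.length : Int)
    String.ofList (head ++ PySem.List.slice l (some qs[1]) (some e))
  else String.ofList head

-- ===== PRECONDITION & SPEC =====
def Spec_string_parser2 (string : String) (index_num : Int) (out : String) : Prop := out = string_parser2_alt string index_num
instance (string : String) (index_num : Int) (out : String) : Decidable (Spec_string_parser2 string index_num out) := by unfold Spec_string_parser2; infer_instance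

-- ===== CLAIM (what is proved, stated in full; the proofs are below) =====
def Claim_equal_string_parser2 : Prop := ∀ (string : String) (index_num : Int), Dom_string_parser2 string index_num → Spec_string_parser2 string index_num (string_parser2 string index_num)

-- ===== LEMMAS AND PROOFS =====

def natPos : List Char → Char → List Nat
  | [], _ => []
  | c :: t, ch => if c = ch then 0 :: (natPos t ch).map (· + 1) else (natPos t ch).map (· + 1)

lemma pos_aux (ch : Char) : ∀ (t : List Char) (k : Int),
    ((PySem.List.enumerate t k).filter (fun p => p.2 == ch)).map Prod.fst
      = (natPos t ch).map (fun (i : Nat) => (i : Int) + k) := by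
  intro t
  induction t with
  | nil => intro k; simp [PySem.List.enumerate_nil, natPos]
  | cons c t ih =>
    intro k
    rw [PySem.List.enumerate_cons]
    by_cases h : c = ch
    · simp only [List.filter_cons, h, beq_self_eq_true, if_pos, List.map_cons, natPos,
        ih (k + 1), List.map_map]
      refine congrArg₂ List.cons (by push_cast; ring) ?_
      exact List.map_congr_left fun i _ => by simp [Function.comp]; ring
    · simp only [List.filter_cons, natPos, if_neg h]
      rw [if_neg (by simpa using h)]
      rw [ih (k + 1), List.map_map]
      exact List.map_congr_left fun i _ => by simp [Function.comp]; ring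

lemma pvPos_eq_natPos (l : List Char) (ch : Char) :
    pvPos l ch = (natPos l ch).map (fun (i : Nat) => (i : Int)) := by
  unfold pvPos
  rw [pos_aux ch l 0]
  exact List.map_congr_left fun i _ => by simp


lemma loopEq_char (n : Int) : ∀ (l acc : List Char) (eq : Nat), eq ≤ 3 →
    pvLoopEq n l acc eq = acc ++
      (match (natPos l '=')[3 - eq]? with
        | some i => l.take (i + 1) ++ PySem.Int.toChars n
        | none => l) := by
  intro l
  induction l with
  | nil => intro acc eq _; simp [pvLoopEq, natPos]
  | cons c t ih =>
    intro acc eq heq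
    by_cases h : c = '='
    · by_cases h4 : eq = 3
      · subst h4
        simp [pvLoopEq, h, natPos]
      · have h30 : 3 - eq = (2 - eq) + 1 := by omega
        subst h
        simp only [pvLoopEq, if_true, if_neg (by omega : ¬ eq + 1 = 4)]
        rw [ih (acc ++ ['=']) (eq + 1) (by omega),
            show 3 - (eq + 1) = 2 - eq from by omega]
        simp only [natPos, h30]
        cases hg : (natPos t '=')[2 - eq]? <;>
          simp [hg, List.append_assoc, List.take_succ_cons]
    · simp only [pvLoopEq, h, if_false, if_neg (by omega : ¬ eq = 4)]
      rw [ih (acc ++ [c]) eq heq]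
      simp only [natPos, if_neg h, List.getElem?_map]
      cases hg : (natPos t '=')[3 - eq]? <;>
        simp [List.append_assoc, List.take_succ_cons]

def qTail (l : List Char) (qc : Nat) : List Char :=
  let qs := natPos l '"'
  if qc ≥ 3 then []
  else if qc = 2 then l.take ((qs[0]?).getD l.length)
  else if qc = 1 then
    match qs[0]? with
    | none => []
    | some i => (l.drop i).take (((qs[1]?).getD l.length) - i)
  else
    match qs[1]? with
    | none => []
    | some i => (l.drop i).take (((qs[2]?).getD l.length) - i)

lemma loopQ_char : ∀ (l acc : List Char) (qc : Nat),
    pvLoopQ l acc qc = acc ++ qTail l qc := by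
  intro l
  induction l with
  | nil =>
    intro acc qc
    simp only [pvLoopQ, qTail, natPos]
    split_ifs <;> simp
  | cons c t ih =>
    intro acc qc
    by_cases h : c = '"'
    · subst h
      rcases qc with _ | _ | _ | qc
      · simp only [pvLoopQ, if_true, qTail, natPos]
        rw [ih]
        norm_num
        cases hg : (natPos t '"')[0]? <;>
          cases hg1 : (natPos t '"')[1]? <;>
            simp [qTail, hg, hg1, Nat.succ_sub_succ]
      · simp only [pvLoopQ, if_true, qTail, natPos]
        rw [ih]
        norm_num
        cases hg : (natPos t '"')[0]? <;>
          simp [qTail, hg]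
      · simp only [pvLoopQ, if_true, qTail, natPos]
        rw [ih]
        norm_num [qTail]
      · simp only [pvLoopQ, if_true, qTail, natPos]
        rw [ih]
        norm_num [qTail]
        omega
    · rcases qc with _ | _ | _ | qc
      · simp only [pvLoopQ, h, if_false, qTail, natPos]
        rw [ih]
        norm_num
        cases hg1 : (natPos t '"')[1]? <;>
          cases hg2 : (natPos t '"')[2]? <;>
            simp [qTail, hg1, hg2, Nat.succ_sub_succ]
      · simp only [pvLoopQ, h, if_false, qTail, natPos]
        rw [ih]
        norm_num
        cases hg : (natPos t '"')[0]? <;>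
          cases hg1 : (natPos t '"')[1]? <;>
            simp [qTail, hg, hg1, Nat.succ_sub_succ]
      · simp only [pvLoopQ, h, if_false, qTail, natPos]
        rw [ih]
        norm_num
        cases hg : (natPos t '"')[0]? <;>
          simp [qTail, hg]
      · simp only [pvLoopQ, h, if_false, qTail, natPos]
        rw [ih]
        norm_num [qTail]
        omega

-- ===== VERDICT (by name: the statement is the Claim_ definition above) =====
theorem string_parser2_spec : Claim_equal_string_parser2 := by
  intro s n _
  unfold Spec_string_parser2 string_parser2 string_parser2_alt
  simp only [pvPos_eq_natPos]
  rw [loopQ_char, loopEq_char n s.toList [] 0 (by omega), List.nil_append]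
  simp only [Nat.sub_zero]
  have hhead : ∀ h4 : 4 ≤ (natPos s.toList '=').length,
      (match (natPos s.toList '=')[3]? with
        | some i => s.toList.take (i + 1) ++ PySem.Int.toChars n
        | none => s.toList) =
      PySem.List.slice s.toList none
          (some (((natPos s.toList '=')[3] : Int) + 1)) ++ PySem.Int.toChars n := by
    intro h4
    rw [List.getElem?_eq_getElem (by omega : 3 < (natPos s.toList '=').length),
      ← Nat.cast_add_one, PySem.List.slice_to_natCast]
    rfl
  have hheadn : ∀ _ : ¬ 4 ≤ (natPos s.toList '=').length,
      (match (natPos s.toList '=')[3]? with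
        | some i => s.toList.take (i + 1) ++ PySem.Int.toChars n
        | none => s.toList) = s.toList := by
    intro h4
    rw [List.getElem?_eq_none (by omega : (natPos s.toList '=').length ≤ 3)]
  by_cases h2 : 2 ≤ (natPos s.toList '"').length
  · rw [dif_pos (by simpa using h2)]
    refine congrArg String.ofList ?_
    have htail : qTail s.toList 0 =
        PySem.List.slice s.toList
          (some ((List.map (fun i : Nat => (i : Int)) (natPos s.toList '"'))[1]'(by
            rw [List.length_map]; omega)))
          (some (if h : 3 ≤ (List.map (fun i : Nat => (i : Int)) (natPos s.toList '"')).length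
                 then (List.map (fun i : Nat => (i : Int)) (natPos s.toList '"'))[2]
                 else (s.toList.length : Int))) := by
      unfold qTail
      norm_num
      rw [List.getElem?_eq_getElem (by omega : 1 < (natPos s.toList '"').length)]
      by_cases h3 : 3 ≤ (natPos s.toList '"').length
      · rw [dif_pos (by simpa using h3),
          List.getElem?_eq_getElem (by omega : 2 < (natPos s.toList '"').length),
          PySem.List.slice_natCast]
        simp
      · rw [dif_neg (by simpa using h3),
          List.getElem?_eq_none (by omega : (natPos s.toList '"').length ≤ 2),
          PySem.List.slice_natCast]
        simp
    rw [htail]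
    refine congrArg₂ (· ++ ·) ?_ rfl
    by_cases h4 : 4 ≤ (natPos s.toList '=').length
    · rw [dif_pos (by simpa using h4), hhead h4]
      rw [List.getElem_map]
      rfl
    · rw [dif_neg (by simpa using h4), hheadn h4]
  · rw [dif_neg (by simpa using h2)]
    refine congrArg String.ofList ?_
    have ht0 : qTail s.toList 0 = [] := by
      unfold qTail
      norm_num [List.getElem?_eq_none (by omega : (natPos s.toList '"').length ≤ 1)]
    rw [ht0, List.append_nil]
    by_cases h4 : 4 ≤ (natPos s.toList '=').length
    · rw [dif_pos (by simpa using h4), hhead h4]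
      rw [List.getElem_map]
      rfl
    · rw [dif_neg (by simpa using h4), hheadn h4]
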